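-- pv_equiv track=rewrite | github.com/DaniloCastroA/INF1026 | listaDic/exc5,6,7.py | combinar_dicionarios
-- ===== SOURCE A (Python) =====
-- def combinar_dicionarios(tupla,dic1,dic2):
--     dicComb={}
--     for elemento in tupla:
--         if(elemento in dic1 and elemento in dic2):
--             dicComb[elemento]=dic1.get(elemento)+dic2.get(elemento)
--         elif(elemento in dic1):
--             dicComb[elemento]=dic1.get(elemento)
--         elif(elemento in dic2):
--             dicComb[elemento]=dic2.get(elemento)
--     return dicComb
-- ===== SOURCE B (Python) =====
-- def combinar_dicionarios(tupla, dic1, dic2):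
--     # Stage 1: merge the two dicts once into a single index of combined values.
--     merged = dict(dic1)
--     for k, v in dic2.items():
--         merged[k] = merged[k] + v if k in merged else v
--     # Stage 2: project the merged index onto the tuple's keys, in tuple order.
--     return {e: merged[e] for e in tupla if e in merged}
-- ===== Notes on version B (the rewrite author's own statement) =====
-- stated objective: alternative
-- what changed: B works in two staged passes: it first merges dic1 and dic2 into one combined index (summing values for shared keys), then projects that index onto the tuple's keys; A instead probes both dicts per tuple element through a three-way membership cascade.
import Mathlib
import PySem

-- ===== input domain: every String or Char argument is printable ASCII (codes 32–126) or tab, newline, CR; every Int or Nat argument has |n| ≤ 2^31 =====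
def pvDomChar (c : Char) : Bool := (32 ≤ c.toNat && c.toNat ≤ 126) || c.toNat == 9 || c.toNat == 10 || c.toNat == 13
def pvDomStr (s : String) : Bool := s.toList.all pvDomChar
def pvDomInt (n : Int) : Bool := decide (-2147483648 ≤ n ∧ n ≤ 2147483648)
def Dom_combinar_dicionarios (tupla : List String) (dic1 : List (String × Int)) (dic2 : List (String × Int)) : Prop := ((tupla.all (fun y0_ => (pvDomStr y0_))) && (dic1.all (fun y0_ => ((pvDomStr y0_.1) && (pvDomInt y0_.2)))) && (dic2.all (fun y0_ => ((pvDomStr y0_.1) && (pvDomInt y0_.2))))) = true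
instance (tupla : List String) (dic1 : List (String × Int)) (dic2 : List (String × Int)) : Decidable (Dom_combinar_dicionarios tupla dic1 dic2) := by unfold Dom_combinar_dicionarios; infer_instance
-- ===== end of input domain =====

-- B restructures A's per-key three-way membership cascade into two staged passes — first merge the
-- two dicts into one combined index, then project that index onto the tuple (objective: alternative).

-- ===== PORT A =====
-- dict arguments are modelled by PySem.Dict.ofList (Python dict construction: later duplicate keys overwrite).
-- dic.get(elemento) is (get? …).getD 0; each use is guarded by 'contains', so the default is never the result.
def combinar_dicionarios (tupla : List String) (dic1 : List (String × Int)) (dic2 : List (String × Int)) : List (String × Int) :=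
  let d1 : PySem.Dict String Int := PySem.Dict.ofList dic1
  let d2 : PySem.Dict String Int := PySem.Dict.ofList dic2
  (tupla.foldl (fun (dicComb : PySem.Dict String Int) elemento =>
      if d1.contains elemento && d2.contains elemento then
        dicComb.insert elemento ((d1.get? elemento).getD 0 + (d2.get? elemento).getD 0)
      else if d1.contains elemento then
        dicComb.insert elemento ((d1.get? elemento).getD 0)
      else if d2.contains elemento then
        dicComb.insert elemento ((d2.get? elemento).getD 0)
      else dicComb) PySem.Dict.empty).items

-- ===== PORT B =====
-- Stage 1: merged = dict(dic1), then the 'for k, v in dic2.items()' loop adds/sums dic2's entries.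
-- Stage 2: the dict comprehension over tupla filtered by membership in merged.
def combinar_dicionarios_alt (tupla : List String) (dic1 : List (String × Int)) (dic2 : List (String × Int)) : List (String × Int) :=
  let merged : PySem.Dict String Int :=
    (PySem.Dict.ofList dic2).items.foldl
      (fun (m : PySem.Dict String Int) kv =>
        if m.contains kv.1 then m.insert kv.1 (m.getD kv.1 0 + kv.2) else m.insert kv.1 kv.2)
      (PySem.Dict.ofList dic1)
  (tupla.foldl (fun (dicComb : PySem.Dict String Int) e =>
      if merged.contains e then dicComb.insert e (merged.getD e 0) else dicComb)
    PySem.Dict.empty).items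

-- ===== PRECONDITION & SPEC =====
def Spec_combinar_dicionarios (tupla : List String) (dic1 : List (String × Int)) (dic2 : List (String × Int)) (out : List (String × Int)) : Prop := out = combinar_dicionarios_alt tupla dic1 dic2
instance (tupla : List String) (dic1 : List (String × Int)) (dic2 : List (String × Int)) (out : List (String × Int)) : Decidable (Spec_combinar_dicionarios tupla dic1 dic2 out) := by unfold Spec_combinar_dicionarios; infer_instance

-- ===== CLAIM (what is proved, stated in full; the proofs are below) =====
def Claim_equal_combinar_dicionarios : Prop := ∀ (tupla : List String) (dic1 : List (String × Int)) (dic2 : List (String × Int)), Dom_combinar_dicionarios tupla dic1 dic2 → Spec_combinar_dicionarios tupla dic1 dic2 (combinar_dicionarios tupla dic1 dic2)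

-- ===== LEMMAS AND PROOFS =====

-- A dict's get? is the first-match lookup in its items list.
theorem dict_get?_eq_find (l : List (String × Int)) (k : String) :
    (PySem.Dict.mk l).get? k = (l.find? (fun p => p.1 == k)).map Prod.snd := by
  induction l with
  | nil => rfl
  | cons a t ih =>
    rw [show (a : String × Int) = (a.1, a.2) from rfl, PySem.Dict.get?_mk_cons, List.find?]
    by_cases h : a.1 = k
    · simp [h]
    · have hb : (a.1 == k) = false := by simp [h]
      simp [hb, ih]

-- The merge loop preserves lookups at keys it never touches.
theorem merge_get?_untouched (l : List (String × Int)) (m : PySem.Dict String Int)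
    (k : String) (hk : k ∉ l.map Prod.fst) :
    (l.foldl (fun (m : PySem.Dict String Int) kv =>
        if m.contains kv.1 then m.insert kv.1 (m.getD kv.1 0 + kv.2) else m.insert kv.1 kv.2) m).get? k
      = m.get? k := by
  induction l generalizing m with
  | nil => rfl
  | cons a t ih =>
    simp only [List.map_cons, List.mem_cons, not_or] at hk
    simp only [List.foldl_cons]
    rw [ih _ hk.2]
    split
    · exact PySem.Dict.get?_insert_of_ne _ _ (fun h => hk.1 h)
    · exact PySem.Dict.get?_insert_of_ne _ _ (fun h => hk.1 h)

-- Stage-1 characterisation: a lookup in the merge loop's result combines the start dict's lookup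
-- with the (unique, by Nodup) entry of the traversed list.
theorem merged_get? (l : List (String × Int)) (hnd : (l.map Prod.fst).Nodup)
    (m : PySem.Dict String Int) (k : String) :
    (l.foldl (fun (m : PySem.Dict String Int) kv =>
        if m.contains kv.1 then m.insert kv.1 (m.getD kv.1 0 + kv.2) else m.insert kv.1 kv.2) m).get? k
      = match (l.find? (fun p => p.1 == k)).map Prod.snd with
        | none => m.get? k
        | some v => some ((m.get? k).elim v (· + v)) := by
  induction l generalizing m with
  | nil => rfl
  | cons a t ih =>
    simp only [List.map_cons, List.nodup_cons] at hnd
    simp only [List.foldl_cons, List.find?]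
    by_cases hak : a.1 = k
    · obtain ⟨a1, a2⟩ := a
      dsimp at hak hnd ⊢
      subst hak
      simp only [beq_self_eq_true]
      have hstep : (if m.contains a1 then m.insert a1 (m.getD a1 0 + a2) else m.insert a1 a2)
          = m.insert a1 ((m.get? a1).elim a2 (· + a2)) := by
        rw [PySem.Dict.contains_eq_isSome_get?]
        cases h : m.get? a1
        · simp
        · simp [PySem.Dict.getD_eq_get?_getD, h]
      rw [hstep, merge_get?_untouched _ _ _ hnd.1]
      simp [PySem.Dict.get?_insert_self]
    · have hbeq : (a.1 == k) = false := by simp [hak]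
      simp only [hbeq]
      rw [ih hnd.2]
      have hstep : (if m.contains a.1 then m.insert a.1 (m.getD a.1 0 + a.2) else m.insert a.1 a.2).get? k
          = m.get? k := by
        split
        · exact PySem.Dict.get?_insert_of_ne _ _ (fun h => hak h.symm)
        · exact PySem.Dict.get?_insert_of_ne _ _ (fun h => hak h.symm)
      split <;> rw [hstep]

-- A's three-way branch equals B's stage-2 step against any dict M whose lookup combines d1's and d2's.
theorem step_eq (d1 d2 M : PySem.Dict String Int) (acc : PySem.Dict String Int) (e : String)
    (hm : M.get? e = match d2.get? e with
        | none => d1.get? e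
        | some v => some ((d1.get? e).elim v (· + v))) :
    (if d1.contains e && d2.contains e then
        acc.insert e ((d1.get? e).getD 0 + (d2.get? e).getD 0)
      else if d1.contains e then acc.insert e ((d1.get? e).getD 0)
      else if d2.contains e then acc.insert e ((d2.get? e).getD 0)
      else acc)
    = (if M.contains e then acc.insert e (M.getD e 0) else acc) := by
  cases h1 : d1.get? e <;> cases h2 : d2.get? e <;> rw [h1, h2] at hm <;> simp at hm <;>
    simp [PySem.Dict.contains_eq_isSome_get?, PySem.Dict.getD_eq_get?_getD, h1, h2, hm]

-- ===== VERDICT (by name: the statement is the Claim_ definition above) =====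
theorem combinar_dicionarios_spec : Claim_equal_combinar_dicionarios := by
  intro tupla dic1 dic2 _
  unfold Spec_combinar_dicionarios combinar_dicionarios combinar_dicionarios_alt
  dsimp only
  congr 1
  apply PySem.List.foldl_congr_mem
  intro acc e _
  apply step_eq
  rw [merged_get? _ (PySem.Dict.nodup_keys_ofList dic2) _ e,
      ← dict_get?_eq_find (PySem.Dict.ofList dic2).items e]
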